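-- pv_equiv track=rewrite | github.com/marcjmonforte/edX-MITx-6.00.1x | Midterm/Midterm, Problem 7.py | dict_invert
-- ===== SOURCE A (Python) =====
-- def dict_invert(d):
--     '''
--     d: dict
--     Returns an inverted dictionary according to the instructions above
--     '''
--     # Establish new dictionary.
--     newDict = {}
--
--     # Iterate through items in dictionary.
--     for item in d:
--
--         # If that value is already in newDict as a key,
--         # append the iterated key to the value, which should be a list.
--         if d[item] in newDict:
--             newDict[d[item]].append(item)
--             newDict[d[item]].sort()
--
--         # If that value is not in newDict as a key,
--         # create a new key using value as name, set it to a list, and append the key into the list.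
--         else:
--             newKey = d[item]
--             newDict[newKey] = []
--             newDict[newKey].append(item)
--
--     return newDict
-- ===== SOURCE B (Python) =====
-- def dict_invert(d):
--     '''
--     d: dict
--     Returns an inverted dictionary according to the instructions above
--     '''
--     # Pre-create one empty group per value (first-appearance order), then append the
--     # keys in ascending order: every group comes out sorted with no sort of a group at all.
--     newDict = {value: [] for value in d.values()}
--     for key in sorted(d):
--         newDict[d[key]].append(key)
--     return newDict
-- ===== Notes on version B (the rewrite author's own statement) =====
-- stated objective: faster
-- what changed: A appends each key to its value's group and re-sorts that group after every single insertion; B pre-creates an empty group per value in first-appearance order and then appends the keys in one pass over sorted(d), so each group is built already sorted and no group is ever sorted.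
import Mathlib
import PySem

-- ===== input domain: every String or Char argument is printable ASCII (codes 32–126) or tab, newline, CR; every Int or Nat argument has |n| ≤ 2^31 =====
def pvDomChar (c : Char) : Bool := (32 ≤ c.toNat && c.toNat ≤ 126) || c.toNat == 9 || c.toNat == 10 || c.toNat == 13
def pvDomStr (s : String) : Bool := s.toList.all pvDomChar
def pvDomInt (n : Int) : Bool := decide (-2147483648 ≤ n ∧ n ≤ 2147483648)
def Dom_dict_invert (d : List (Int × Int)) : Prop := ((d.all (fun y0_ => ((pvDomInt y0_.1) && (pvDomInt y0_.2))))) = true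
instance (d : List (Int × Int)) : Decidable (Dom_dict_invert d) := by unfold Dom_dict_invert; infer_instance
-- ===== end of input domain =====

-- B pre-creates an empty group per value (first-appearance order) and appends the keys in one
-- pass over sorted(d), instead of A's re-sort of a group after every insertion (objective: faster).


-- ===== PORT A =====
-- literal port of A: iterate the dict's items; append the key to the group of its value and
-- re-sort that group each time (creating the group on first sight)
def dict_invert (d : List (Int × Int)) : List (Int × List Int) :=
  let dd := PySem.Dict.ofList d
  let newDict : PySem.Dict Int (List Int) :=
    dd.items.foldl (fun nd item =>
      if nd.contains item.2 then
        (nd.modify item.2 [] (fun l => l ++ [item.1])).modify item.2 []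
          (fun l => PySem.List.sorted l (fun x => x) false)
      else
        (nd.insert item.2 []).modify item.2 [] (fun l => l ++ [item.1]))
      PySem.Dict.empty
  newDict.items

-- ===== PORT B =====
-- port of B: `{value: [] for value in d.values()}` (insert overwrites in place, so a value keeps
-- its first-appearance position, exactly like Python's dict comprehension), then one pass over
-- sorted(d) appending each key to its value's group.  `d[key]` is ported as `dd.getD key 0`,
-- exact here because key ranges over dd's keys (no KeyError is reachable); likewise the group
-- lookup `newDict[d[key]]` always finds a key created by the comprehension, so `modify _ []` is exact.
def dict_invert_alt (d : List (Int × Int)) : List (Int × List Int) :=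
  let dd := PySem.Dict.ofList d
  let newDict : PySem.Dict Int (List Int) :=
    dd.values.foldl (fun nd v => nd.insert v ([] : List Int)) PySem.Dict.empty
  let result : PySem.Dict Int (List Int) :=
    (PySem.List.sorted dd.keys (fun x => x) false).foldl
      (fun nd k => nd.modify (dd.getD k 0) [] (fun l => l ++ [k])) newDict
  result.items

-- ===== PRECONDITION & SPEC =====
def Spec_dict_invert (d : List (Int × Int)) (out : List (Int × List Int)) : Prop := out = dict_invert_alt d
instance (d : List (Int × Int)) (out : List (Int × List Int)) : Decidable (Spec_dict_invert d out) := by unfold Spec_dict_invert; infer_instance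

-- ===== CLAIM (what is proved, stated in full; the proofs are below) =====
def Claim_equal_dict_invert : Prop := ∀ (d : List (Int × Int)), Dom_dict_invert d → Spec_dict_invert d (dict_invert d)

-- ===== LEMMAS AND PROOFS =====

-- proof-side canonical form shared by both halves: the first-appearance-ordered distinct
-- values, each paired with the sorted list of its keys
def pvSortId (l : List Int) : List Int := PySem.List.sorted l (fun x => x) false

def pvOrd (L : List (Int × Int)) : List Int := PySem.Set.ofList (L.map (·.2))

def pvGrp (L : List (Int × Int)) (v : Int) : List Int :=
  pvSortId ((L.filter (fun p => p.2 == v)).map (·.1))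

def pvB (L : List (Int × Int)) : List (Int × List Int) :=
  (pvOrd L).map (fun v => (v, pvGrp L v))

-- A's loop body, named for the proofs
def pvStepA (nd : PySem.Dict Int (List Int)) (item : Int × Int) : PySem.Dict Int (List Int) :=
  if nd.contains item.2 then
    (nd.modify item.2 [] (fun l => l ++ [item.1])).modify item.2 []
      (fun l => PySem.List.sorted l (fun x => x) false)
  else
    (nd.insert item.2 []).modify item.2 [] (fun l => l ++ [item.1])

-- generic facts about a dict whose items are `order.map (fun w => (w, g w))`
theorem pv_contains_mk (order : List Int) (g : Int → List Int) (v : Int) :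
    (PySem.Dict.mk (order.map (fun w => (w, g w)))).contains v = order.contains v := by
  simp [PySem.Dict.contains, List.any_map, Function.comp_def, List.any_beq']

theorem pv_contains_items (d : PySem.Dict Int (List Int)) (v : Int) :
    d.contains v = (PySem.Dict.mk d.items).contains v := rfl

theorem pv_getD_items (d : PySem.Dict Int (List Int)) (v : Int) :
    d.getD v [] = (PySem.Dict.mk d.items).getD v [] := rfl

theorem pv_getD_mk (order : List Int) (g : Int → List Int) (v : Int) :
    (PySem.Dict.mk (order.map (fun w => (w, g w)))).getD v [] =
      if order.contains v then g v else [] := by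
  induction order with
  | nil => rfl
  | cons w t ih =>
    by_cases h : w = v
    · simp [PySem.Dict.getD, PySem.Dict.get?, h]
    · simp only [List.map_cons, PySem.Dict.getD_eq_get?_getD, PySem.Dict.get?_mk_cons] at *
      simp [h, ih, Ne.symm h]

theorem pv_sortId_sortId_append (l : List Int) (k : Int) :
    PySem.List.sorted (pvSortId l ++ [k]) (fun x => x) false = pvSortId (l ++ [k]) := by
  unfold pvSortId
  exact PySem.List.sorted_eq_sorted_of_perm _ _ _ (fun a b h => h)
    (List.Perm.append_right [k] (PySem.List.sorted_perm l (fun x => x) false))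

theorem pv_ord_append (L : List (Int × Int)) (x : Int × Int) :
    pvOrd (L ++ [x]) = if x.2 ∈ pvOrd L then pvOrd L else pvOrd L ++ [x.2] := by
  unfold pvOrd
  rw [List.map_append, List.map_singleton, PySem.Set.ofList_append_singleton, PySem.Set.add_eq_ite]

theorem pv_mem_ord (L : List (Int × Int)) (v : Int) : v ∈ pvOrd L ↔ v ∈ L.map (·.2) := by
  simp [pvOrd, PySem.Set.mem_ofList]

theorem pv_grp_append_same (L : List (Int × Int)) (k v : Int) :
    pvGrp (L ++ [(k, v)]) v = pvSortId (((L.filter (fun p => p.2 == v)).map (·.1)) ++ [k]) := by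
  simp [pvGrp, List.filter_append]

theorem pv_grp_append_ne (L : List (Int × Int)) (k v w : Int) (h : w ≠ v) :
    pvGrp (L ++ [(k, v)]) w = pvGrp L w := by
  simp [pvGrp, List.filter_append, Ne.symm h]

-- A's loop, characterised: after folding over L the items are exactly pvB L
theorem pv_foldA (L : List (Int × Int)) :
    (L.foldl pvStepA PySem.Dict.empty).items = pvB L := by
  induction L using List.reverseRecOn with
  | nil => rfl
  | append_singleton L x ih =>
    obtain ⟨k, v⟩ := x
    rw [List.foldl_append, List.foldl_cons, List.foldl_nil]
    have hD : (L.foldl pvStepA PySem.Dict.empty) = PySem.Dict.mk (pvB L) := by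
      apply PySem.Dict.ext; exact ih
    rw [hD]
    have hc : (PySem.Dict.mk (pvB L)).contains v = (pvOrd L).contains v := pv_contains_mk _ _ _
    by_cases h : v ∈ pvOrd L
    · rw [pvStepA, if_pos (by rw [hc]; simpa using h)]
      simp only [PySem.Dict.modify, PySem.Dict.getD_insert_self, PySem.Dict.insert_insert_self]
      rw [show (PySem.Dict.mk (pvB L)).getD v [] = pvGrp L v by
            rw [pvB, pv_getD_mk, if_pos (by simpa using h)]]
      rw [pvGrp, pv_sortId_sortId_append, ← pv_grp_append_same]
      rw [PySem.Dict.items_insert, hc, if_pos (by simpa using h)]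
      rw [pvB, pvB, pv_ord_append, if_pos h, List.map_map]
      apply List.map_congr_left
      intro w hw
      by_cases hwv : w = v
      · simp [hwv]
      · simp [hwv, pv_grp_append_ne L k v w hwv]
    · rw [pvStepA, if_neg (by rw [hc]; simpa using h)]
      simp only [PySem.Dict.modify, PySem.Dict.getD_insert_self, PySem.Dict.insert_insert_self]
      have hnc : (PySem.Dict.mk (pvB L)).contains v = false := by rw [hc]; simpa using h
      rw [PySem.Dict.items_insert, hnc, if_neg (by simp)]
      rw [pvB, pvB, pv_ord_append, if_neg h, List.map_append]
      have hfil : L.filter (fun p => p.2 == v) = [] := by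
        rw [List.filter_eq_nil_iff]
        intro p hp
        simp only [beq_iff_eq]
        intro hpv
        exact h ((pv_mem_ord L v).2 (List.mem_map.2 ⟨p, hp, hpv⟩))
      have hgrp : pvGrp (L ++ [(k, v)]) v = [k] := by
        rw [pv_grp_append_same, hfil]
        exact PySem.List.sorted_eq_self_of_pairwise _ _ (List.pairwise_singleton _ _)
      rw [List.map_singleton, hgrp]
      congr 1
      apply List.map_congr_left
      intro w hw
      rw [pv_grp_append_ne L k v w (fun e => h (e ▸ hw))]

-- B's comprehension `{v: [] for v in vs}`, characterised
theorem pv_init_items (vs : List Int) :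
    (vs.foldl (fun nd v => nd.insert v ([] : List Int)) PySem.Dict.empty).items =
      (PySem.Set.ofList vs).map (fun v => (v, ([] : List Int))) := by
  induction vs using List.reverseRecOn with
  | nil => rfl
  | append_singleton t v ih =>
    have hc : (t.foldl (fun nd v => nd.insert v ([] : List Int)) PySem.Dict.empty).contains v
        = List.contains (PySem.Set.ofList t) v := by
      rw [pv_contains_items, ih, pv_contains_mk]
    rw [List.foldl_append, List.foldl_cons, List.foldl_nil, PySem.Dict.items_insert,
        PySem.Set.ofList_append_singleton, PySem.Set.add_eq_ite, hc, ih, List.map_map]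
    by_cases h : v ∈ PySem.Set.ofList t
    · rw [if_pos (by simpa using h), if_pos h]
      apply List.map_congr_left
      intro w _
      by_cases hw : w = v <;> simp [hw]
    · rw [if_neg (by simpa using h), if_neg h, List.map_append]
      simp

theorem pv_init_getD (vs : List Int) (v : Int) :
    (vs.foldl (fun nd v => nd.insert v ([] : List Int)) PySem.Dict.empty).getD v [] = [] := by
  rw [pv_getD_items, pv_init_items, pv_getD_mk]
  split <;> rfl

-- filtering commutes with sorting (identity key)
theorem pv_filter_sorted (xs : List Int) (p : Int → Bool) :
    (pvSortId xs).filter p = pvSortId (xs.filter p) := by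
  apply PySem.List.eq_of_perm_of_pairwise_le_of_injective (key := fun x => x) (fun a b h => h)
  · exact ((PySem.List.sorted_perm xs _ _).filter p).trans
      (PySem.List.sorted_perm (xs.filter p) _ _).symm
  · exact List.Pairwise.sublist List.filter_sublist (PySem.List.sorted_pairwise xs _)
  · exact PySem.List.sorted_pairwise (xs.filter p) _

theorem pv_getD_mem_values (d : PySem.Dict Int Int) (k : Int)
    (h : k ∈ d.keys) (hnd : d.keys.Nodup) : d.getD k 0 ∈ d.values := by
  simp only [PySem.Dict.keys] at h
  obtain ⟨p, hp, hk⟩ := List.mem_map.1 h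
  have he : d.getD k 0 = p.2 := by
    subst hk
    exact PySem.Dict.getD_of_mem_items d (by simpa using hp) hnd 0
  rw [he]
  simp only [PySem.Dict.values]
  exact List.mem_map.2 ⟨p, hp, rfl⟩

-- B's computation, characterised: it also produces pvB of the dict's items
theorem pv_B_side (d : List (Int × Int)) :
    dict_invert_alt d = pvB (PySem.Dict.ofList d).items := by
  have hnd : (PySem.Dict.ofList d).keys.Nodup := PySem.Dict.nodup_keys_ofList d
  set dd := PySem.Dict.ofList d with hdd
  set L := dd.items with hL
  set ks := PySem.List.sorted dd.keys (fun x => x) false with hks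
  set init : PySem.Dict Int (List Int) :=
    dd.values.foldl (fun nd v => nd.insert v ([] : List Int)) PySem.Dict.empty with hinit
  set R : PySem.Dict Int (List Int) :=
    ks.foldl (fun nd k => nd.modify (dd.getD k 0) [] (fun l => l ++ [k])) init with hR
  show R.items = pvB L
  have hinitkeys : init.keys = PySem.Set.ofList dd.values := by
    rw [hinit]
    simp only [PySem.Dict.keys, pv_init_items, List.map_map]
    simp [Function.comp_def]
  have hkeys : R.keys = PySem.Set.ofList dd.values := by
    rw [hR, PySem.Dict.keys_foldl_modify_key, hinitkeys, PySem.Set.update_eq_append_filter]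
    have hnil : (PySem.Set.ofList (ks.map (fun k => dd.getD k 0))).filter
        (fun y => !(PySem.Set.contains (PySem.Set.ofList dd.values) y)) = [] := by
      rw [List.filter_eq_nil_iff]
      intro y hy
      have hy' : y ∈ ks.map (fun k => dd.getD k 0) := (PySem.Set.mem_ofList _ _).1 hy
      obtain ⟨k, hk, rfl⟩ := List.mem_map.1 hy'
      have hkmem : k ∈ dd.keys := (PySem.List.mem_sorted _ _ _ _).1 hk
      have := pv_getD_mem_values dd k hkmem hnd
      simp [PySem.Set.contains_eq_listContains, this]
    rw [hnil, List.append_nil]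
  have hRnodup : R.keys.Nodup := by rw [hkeys]; exact PySem.Set.nodup_ofList _
  have hgetD : ∀ v : Int, R.getD v [] = ks.filter (fun k => dd.getD k 0 == v) := by
    intro v
    have hfold : R = (ks.map (fun k => (dd.getD k 0, k))).foldl
        (fun nd p => nd.modify p.1 [] (fun l => l ++ [p.2])) init := by
      rw [hR, List.foldl_map]
    rw [hfold, PySem.Dict.getD_foldl_modify_append, hinit, pv_init_getD,
        List.nil_append, List.filter_map, List.map_map]
    simp [Function.comp_def]
  rw [PySem.Dict.items_eq_map_keys R hRnodup [], hkeys]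
  have hgrp : ∀ v : Int, R.getD v [] = pvGrp L v := by
    intro v
    rw [hgetD v, hks,
        show dd.keys = L.map (·.1) from rfl,
        show PySem.List.sorted (L.map (·.1)) (fun x => x) false = pvSortId (L.map (·.1)) from rfl,
        pv_filter_sorted, pvGrp]
    congr 1
    rw [List.filter_map]
    congr 1
    apply List.filter_congr
    intro q hq
    have he : dd.getD q.1 0 = q.2 :=
      PySem.Dict.getD_of_mem_items dd (by simpa using hq) hnd 0
    simp [he]
  rw [show dd.values = L.map (·.2) from rfl]
  rw [show PySem.Set.ofList (L.map (·.2)) = pvOrd L from rfl]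
  apply List.map_congr_left
  intro v hv
  rw [hgrp v]

-- ===== VERDICT (by name: the statement is the Claim_ definition above) =====
theorem dict_invert_spec : Claim_equal_dict_invert := by
  intro d _
  show dict_invert d = dict_invert_alt d
  rw [pv_B_side]
  exact pv_foldA (PySem.Dict.ofList d).items
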